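-- pv_equiv track=rewrite | github.com/PhungKhaiMinh/python_api_test | app.py | are_similar_chars
-- ===== SOURCE A (Python) =====
-- def are_similar_chars(char1, char2):
--     """Kiểm tra hai ký tự có tương tự nhau không (OCR confusion)"""
--     similar_groups = [
--         {'G', 'C', '6', '0', 'O'},
--         {'I', 'L', '1', 'l', 'T'},
--         {'N', 'H'},
--         {'A', '4'},
--         {'S', '5'},
--         {'B', '8'}
--     ]
--
--     for group in similar_groups:
--         if char1 in group and char2 in group:
--             return True
--     return False
-- ===== SOURCE B (Python) =====
-- _CHAR_GROUP = {}
-- for _i, _chars in enumerate(["GC60O", "IL1lT", "NH", "A4", "S5", "B8"]):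
--     for _c in _chars:
--         _CHAR_GROUP[_c] = _i
--
-- def are_similar_chars(char1, char2):
--     """Kiểm tra hai ký tự có tương tự nhau không (OCR confusion)"""
--     g1 = _CHAR_GROUP.get(char1)
--     return g1 is not None and g1 == _CHAR_GROUP.get(char2)
-- ===== Notes on version B (the rewrite author's own statement) =====
-- stated objective: idiomatic
-- what changed: A rebuilds six similarity sets and scans them on every call; B precomputes one flat char-to-group-index dict at module load and answers with two dict lookups (guarded so two unknown chars do not compare equal).
import Mathlib
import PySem

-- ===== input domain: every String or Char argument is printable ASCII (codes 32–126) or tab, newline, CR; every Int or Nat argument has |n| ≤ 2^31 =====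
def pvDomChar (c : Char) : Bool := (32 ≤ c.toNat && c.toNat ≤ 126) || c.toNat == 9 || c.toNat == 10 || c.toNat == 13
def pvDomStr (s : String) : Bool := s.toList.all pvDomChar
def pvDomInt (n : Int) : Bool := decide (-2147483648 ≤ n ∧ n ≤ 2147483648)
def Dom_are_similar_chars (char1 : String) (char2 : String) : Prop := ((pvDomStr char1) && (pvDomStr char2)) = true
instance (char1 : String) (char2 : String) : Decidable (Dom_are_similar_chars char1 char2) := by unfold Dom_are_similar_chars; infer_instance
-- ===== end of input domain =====

-- B replaces A's per-call scan over six similarity sets by a flat char→group-index dict built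
-- once at module level; the check becomes two lookups compared (None-guarded).

-- ===== PORT A =====
-- 'for group in similar_groups: if char1 in group and char2 in group: return True' ... 'return False'
def pvLoopA (char1 char2 : String) : List (PySem.Set String) → Bool
  | [] => false
  | g :: rest =>
      if PySem.Set.contains g char1 && PySem.Set.contains g char2 then true
      else pvLoopA char1 char2 rest

def are_similar_chars (char1 : String) (char2 : String) : Bool :=
  let similar_groups : List (PySem.Set String) :=
    [ PySem.Set.ofList ["G", "C", "6", "0", "O"],
      PySem.Set.ofList ["I", "L", "1", "l", "T"],
      PySem.Set.ofList ["N", "H"],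
      PySem.Set.ofList ["A", "4"],
      PySem.Set.ofList ["S", "5"],
      PySem.Set.ofList ["B", "8"] ]
  pvLoopA char1 char2 similar_groups

-- ===== PORT B =====
-- module level: for _i, _chars in enumerate(["GC60O", ...]): for _c in _chars: _CHAR_GROUP[_c] = _i
def pvCharGroup : PySem.Dict String Int :=
  (PySem.List.enumerate ["GC60O", "IL1lT", "NH", "A4", "S5", "B8"]).foldl
    (fun d p => p.2.toList.foldl (fun d c => d.insert (String.ofList [c]) p.1) d)
    PySem.Dict.empty

def are_similar_chars_alt (char1 : String) (char2 : String) : Bool :=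
  -- g1 = _CHAR_GROUP.get(char1); return g1 is not None and g1 == _CHAR_GROUP.get(char2)
  match PySem.Dict.get? pvCharGroup char1 with
  | none => false
  | some g1 =>
      match PySem.Dict.get? pvCharGroup char2 with
      | none => false
      | some g2 => g1 == g2

-- ===== PRECONDITION & SPEC =====
def Spec_are_similar_chars (char1 : String) (char2 : String) (out : Bool) : Prop := out = are_similar_chars_alt char1 char2
instance (char1 : String) (char2 : String) (out : Bool) : Decidable (Spec_are_similar_chars char1 char2 out) := by unfold Spec_are_similar_chars; infer_instance

-- ===== CLAIM (what is proved, stated in full; the proofs are below) =====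
def Claim_equal_are_similar_chars : Prop := ∀ (char1 : String) (char2 : String), Dom_are_similar_chars char1 char2 → Spec_are_similar_chars char1 char2 (are_similar_chars char1 char2)

-- ===== LEMMAS AND PROOFS =====

-- every character occurring in any group, in dict-insertion order
def pvKeys : List String :=
  ["G", "C", "6", "0", "O", "I", "L", "1", "l", "T", "N", "H", "A", "4", "S", "5", "B", "8"]

-- B's module-level dict, evaluated to its item list
theorem pvCharGroup_eq :
    pvCharGroup = PySem.Dict.mk
      [("G", 0), ("C", 0), ("6", 0), ("0", 0), ("O", 0), ("I", 1), ("L", 1), ("1", 1), ("l", 1),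
       ("T", 1), ("N", 2), ("H", 2), ("A", 3), ("4", 3), ("S", 4), ("5", 4), ("B", 5), ("8", 5)] := by
  decide

-- a string equal to no group character: A returns false whichever side it is on, and B's dict misses it
theorem pvNotKey (c : String) (h : c ∉ pvKeys) :
    (∀ x, are_similar_chars c x = false ∧ are_similar_chars x c = false) ∧
      PySem.Dict.get? pvCharGroup c = none := by
  simp only [pvKeys, List.mem_cons, List.not_mem_nil, or_false, not_or] at h
  obtain ⟨h1, h2, h3, h4, h5, h6, h7, h8, h9, h10, h11, h12, h13, h14, h15, h16, h17, h18⟩ := h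
  refine ⟨fun x => ?_, ?_⟩
  · constructor <;>
      simp [are_similar_chars, pvLoopA, PySem.Set.contains, h1, h2, h3, h4, h5, h6, h7, h8, h9,
        h10, h11, h12, h13, h14, h15, h16, h17, h18]
  · simp [pvCharGroup_eq, PySem.Dict.get?, Ne.symm h1, Ne.symm h2, Ne.symm h3, Ne.symm h4,
      Ne.symm h5, Ne.symm h6, Ne.symm h7, Ne.symm h8, Ne.symm h9, Ne.symm h10, Ne.symm h11,
      Ne.symm h12, Ne.symm h13, Ne.symm h14, Ne.symm h15, Ne.symm h16, Ne.symm h17, Ne.symm h18]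

theorem pvAgree (c1 c2 : String) : are_similar_chars c1 c2 = are_similar_chars_alt c1 c2 := by
  by_cases h1 : c1 ∈ pvKeys
  · by_cases h2 : c2 ∈ pvKeys
    · simp only [pvKeys, List.mem_cons, List.not_mem_nil, or_false] at h1 h2
      rcases h1 with rfl | rfl | rfl | rfl | rfl | rfl | rfl | rfl | rfl | rfl | rfl | rfl | rfl | rfl | rfl | rfl | rfl | rfl <;>
        rcases h2 with rfl | rfl | rfl | rfl | rfl | rfl | rfl | rfl | rfl | rfl | rfl | rfl | rfl | rfl | rfl | rfl | rfl | rfl <;>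
        decide
    · obtain ⟨ha, hg⟩ := pvNotKey c2 h2
      rw [(ha c1).2]
      cases hc : PySem.Dict.get? pvCharGroup c1 <;> simp [are_similar_chars_alt, hc, hg]
  · obtain ⟨ha, hg⟩ := pvNotKey c1 h1
    rw [(ha c2).1]
    simp [are_similar_chars_alt, hg]

-- ===== VERDICT (by name: the statement is the Claim_ definition above) =====
theorem are_similar_chars_spec : Claim_equal_are_similar_chars := by
  intro c1 c2 _
  unfold Spec_are_similar_chars
  exact pvAgree c1 c2
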